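-- pv_equiv track=rewrite | github.com/marcin-michal/product-margin-analyzer | backend/app/services/parser.py | get_column_mapping_suggestion
-- ===== SOURCE A (Python) =====
-- MAPPING_KEYWORDS = {
--     "ean": ["ean", "barcode", "gtin", "code", "id"],
--     "product": ["product", "name"],
--     "price": ["price", "cost"],
-- }
--
-- def get_column_mapping_suggestion(header_values: list) -> dict[str, int | None]:
--     mapping: dict[str, int | None] = {}
--
--     for mapped_col, keywords in MAPPING_KEYWORDS.items():
--         found_col_key = None
--
--         for i, val in enumerate(header_values):
--             if any(k in str(val).lower() for k in keywords):
--                 found_col_key = i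
--                 break
--
--         mapping[mapped_col] = found_col_key
--
--     return mapping
-- ===== SOURCE B (Python) =====
-- MAPPING_KEYWORDS = {
--     "ean": ["ean", "barcode", "gtin", "code", "id"],
--     "product": ["product", "name"],
--     "price": ["price", "cost"],
-- }
--
-- def get_column_mapping_suggestion(header_values: list) -> dict[str, int | None]:
--     # single value-major pass: each header string is lowered once, and the
--     # first matching index per key is kept via an 'already found' guard
--     ean = product = price = None
--     for i, val in enumerate(header_values):
--         s = str(val).lower()
--         if ean is None and any(k in s for k in ("ean", "barcode", "gtin", "code", "id")):
--             ean = i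
--         if product is None and any(k in s for k in ("product", "name")):
--             product = i
--         if price is None and any(k in s for k in ("price", "cost")):
--             price = i
--     return {"ean": ean, "product": product, "price": price}
-- ===== Notes on version B (the rewrite author's own statement) =====
-- stated objective: alternative
-- what changed: Replaces the key-major nested scan (re-lowering every header once per keyword group, with break) by a single value-major pass that lowers each header once and fills three 'first match' accumulators guarded by 'is None'.
import Mathlib
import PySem

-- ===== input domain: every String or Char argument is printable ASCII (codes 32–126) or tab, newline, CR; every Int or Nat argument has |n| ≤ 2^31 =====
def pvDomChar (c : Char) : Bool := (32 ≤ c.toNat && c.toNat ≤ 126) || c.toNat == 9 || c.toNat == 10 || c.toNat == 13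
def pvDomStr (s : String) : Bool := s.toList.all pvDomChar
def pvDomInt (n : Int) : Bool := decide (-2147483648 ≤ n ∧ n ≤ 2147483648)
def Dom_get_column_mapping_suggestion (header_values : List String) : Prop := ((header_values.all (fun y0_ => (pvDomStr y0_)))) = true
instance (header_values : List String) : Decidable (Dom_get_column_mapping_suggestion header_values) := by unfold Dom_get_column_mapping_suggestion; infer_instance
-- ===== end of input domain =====

-- B replaces A's key-major nested scan (with break) by one value-major pass with
-- three 'first match' accumulators; alternative decomposition, same result.

-- any(k in s for k in keywords)
def pvAnyIn (keywords : List String) (s : String) : Bool :=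
  keywords.any (fun k => PySem.Str.isIn k s)

-- ===== PORT A =====
def MAPPING_KEYWORDS : List (String × List String) :=
  [("ean", ["ean", "barcode", "gtin", "code", "id"]),
   ("product", ["product", "name"]),
   ("price", ["price", "cost"])]

-- A's inner loop: first i whose lowered value contains a keyword (break = stop recursion)
def pvFindCol (keywords : List String) : List (Int × String) → Option Int
  | [] => none
  | (i, val) :: rest =>
      if pvAnyIn keywords (PySem.Str.lower val) then some i
      else pvFindCol keywords rest

def get_column_mapping_suggestion (header_values : List String) : List (String × Option Int) :=
  (MAPPING_KEYWORDS.foldl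
    (fun (mapping : PySem.Dict String (Option Int)) kw =>
      mapping.insert kw.1 (pvFindCol kw.2 (PySem.List.enumerate header_values)))
    PySem.Dict.empty).items

-- ===== PORT B =====
def pvStepB (acc : Option Int × Option Int × Option Int) (iv : Int × String) :
    Option Int × Option Int × Option Int :=
  let s := PySem.Str.lower iv.2
  (if acc.1.isNone && pvAnyIn ["ean", "barcode", "gtin", "code", "id"] s then some iv.1 else acc.1,
   if acc.2.1.isNone && pvAnyIn ["product", "name"] s then some iv.1 else acc.2.1,
   if acc.2.2.isNone && pvAnyIn ["price", "cost"] s then some iv.1 else acc.2.2)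

def get_column_mapping_suggestion_alt (header_values : List String) : List (String × Option Int) :=
  let st := (PySem.List.enumerate header_values).foldl pvStepB (none, none, none)
  [("ean", st.1), ("product", st.2.1), ("price", st.2.2)]

-- ===== PRECONDITION & SPEC =====
def Spec_get_column_mapping_suggestion (header_values : List String) (out : List (String × Option Int)) : Prop := out = get_column_mapping_suggestion_alt header_values
instance (header_values : List String) (out : List (String × Option Int)) : Decidable (Spec_get_column_mapping_suggestion header_values out) := by unfold Spec_get_column_mapping_suggestion; infer_instance

-- ===== CLAIM (what is proved, stated in full; the proofs are below) =====
def Claim_equal_get_column_mapping_suggestion : Prop := ∀ (header_values : List String), Dom_get_column_mapping_suggestion header_values → Spec_get_column_mapping_suggestion header_values (get_column_mapping_suggestion header_values)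

-- ===== LEMMAS AND PROOFS =====

-- 'keep the first hit' combinator: the B accumulator keeps its value once set
def pvFirst (e x : Option Int) : Option Int := if e.isNone then x else e

-- B's fold computes, per key, A's first-match search merged behind any value already found
lemma pvFoldB_eq (vals : List (Int × String)) (e p c : Option Int) :
    vals.foldl pvStepB (e, p, c) =
    (pvFirst e (pvFindCol ["ean", "barcode", "gtin", "code", "id"] vals),
     pvFirst p (pvFindCol ["product", "name"] vals),
     pvFirst c (pvFindCol ["price", "cost"] vals)) := by
  induction vals generalizing e p c with
  | nil => simp [pvFindCol, pvFirst]
  | cons hd tl ih =>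
      obtain ⟨i, val⟩ := hd
      simp only [List.foldl_cons, pvStepB, pvFindCol, ih]
      refine Prod.ext ?_ (Prod.ext ?_ ?_)
      · cases e <;> cases hm : pvAnyIn ["ean", "barcode", "gtin", "code", "id"] (PySem.Str.lower val) <;> simp [pvFirst, hm]
      · cases p <;> cases hm : pvAnyIn ["product", "name"] (PySem.Str.lower val) <;> simp [pvFirst, hm]
      · cases c <;> cases hm : pvAnyIn ["price", "cost"] (PySem.Str.lower val) <;> simp [pvFirst, hm]

-- ===== VERDICT (by name: the statement is the Claim_ definition above) =====
theorem get_column_mapping_suggestion_spec : Claim_equal_get_column_mapping_suggestion := by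
  intro hv _
  unfold Spec_get_column_mapping_suggestion
  unfold get_column_mapping_suggestion get_column_mapping_suggestion_alt MAPPING_KEYWORDS
  simp [pvFoldB_eq, pvFirst, PySem.Dict.insert, PySem.Dict.empty,
    PySem.Dict.contains, List.foldl]
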